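-- pv_equiv track=rewrite | github.com/xid32/Interactive-Cookbook-for-AllRecipes.com | Interactive Cookbook/get_directions.py | remove_overlap_time
-- ===== SOURCE A (Python) =====
-- def remove_overlap_time(time_dict):
--     interval = []
--     for ind in time_dict:
--         if is_compound_time(time_dict[ind]):
--             start = ind
--             end = start + len(time_dict[ind])
--             interval.append((start, end))
--
--     for ind in time_dict:
--         if not is_compound_time(time_dict[ind]):
--             start = ind
--             if is_overlap(start, interval):
--                 time_dict[ind] = "removed"
--     return time_dict
--
-- def is_compound_time(time):
--     return ("hour" in time and "minute" in time) or ("minute" in time and "second" in time)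
--
-- def is_overlap(start, interval):
--     for tup in interval:
--         if tup[0] <= start + 1 and start + 1 <= tup[1]: return True
--     return False
-- ===== SOURCE B (Python) =====
-- def remove_overlap_time(time_dict):
--     # Same result as A; builds the set of covered integer points once, so each
--     # entry needs only a set-membership test. Mutates time_dict in place like A.
--     covered = set()
--     for ind, val in time_dict.items():
--         if _is_compound(val):
--             covered.update(range(ind, ind + len(val) + 1))
--     for ind, val in list(time_dict.items()):
--         if not _is_compound(val) and ind + 1 in covered:
--             time_dict[ind] = "removed"
--     return time_dict
--
-- def _is_compound(time):
--     return ("hour" in time and "minute" in time) or ("minute" in time and "second" in time)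
-- ===== Notes on version B (the rewrite author's own statement) =====
-- stated objective: alternative
-- what changed: A scans the whole compound-interval list for every simple entry; B instead builds the set of covered integer points once and replaces each inner interval scan by a single set-membership test.
import Mathlib
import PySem

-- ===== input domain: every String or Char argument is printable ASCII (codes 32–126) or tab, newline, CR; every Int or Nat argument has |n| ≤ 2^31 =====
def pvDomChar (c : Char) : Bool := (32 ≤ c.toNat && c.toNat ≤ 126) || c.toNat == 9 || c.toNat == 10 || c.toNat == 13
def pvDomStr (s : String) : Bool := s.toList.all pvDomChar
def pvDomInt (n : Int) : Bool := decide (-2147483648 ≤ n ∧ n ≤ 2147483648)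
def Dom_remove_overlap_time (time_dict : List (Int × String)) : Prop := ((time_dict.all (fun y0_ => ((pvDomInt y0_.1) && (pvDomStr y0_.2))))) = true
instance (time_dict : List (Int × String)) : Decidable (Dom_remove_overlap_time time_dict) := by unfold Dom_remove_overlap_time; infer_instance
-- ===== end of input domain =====

-- B replaces A's per-key scan over the compound-interval list by a covered-point set
-- built once, so the inner scan is a single set-membership test (objective: alternative).
-- Both A and B mutate the dict in place in Python; the equivalence is about the return value.

-- ===== PORT A =====
-- is_compound_time(time)
def is_compound_time (time : String) : Bool :=
  (PySem.Str.isIn "hour" time && PySem.Str.isIn "minute" time) ||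
  (PySem.Str.isIn "minute" time && PySem.Str.isIn "second" time)

-- is_overlap(start, interval): scan intervals, first hit returns True
def is_overlap (start : Int) (interval : List (Int × Int)) : Bool :=
  interval.any (fun tup => decide (tup.1 ≤ start + 1) && decide (start + 1 ≤ tup.2))

def remove_overlap_time (time_dict : List (Int × String)) : List (Int × String) :=
  let interval : List (Int × Int) :=
    time_dict.foldl (fun acc p =>
      if is_compound_time p.2 then acc ++ [(p.1, p.1 + PySem.Str.len p.2)] else acc) []
  -- second loop: rewrite each non-compound overlapping entry to "removed"
  time_dict.map (fun p =>
    if !is_compound_time p.2 && is_overlap p.1 interval then (p.1, "removed") else p)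

-- ===== PORT B =====
-- Source B's helper _is_compound is textually identical to is_compound_time; the port reuses it.
def remove_overlap_time_alt (time_dict : List (Int × String)) : List (Int × String) :=
  let covered : PySem.Set Int :=
    time_dict.foldl (fun s p =>
      if is_compound_time p.2 then
        PySem.Set.update s (PySem.List.pyRange p.1 (p.1 + PySem.Str.len p.2 + 1) 1)
      else s) PySem.Set.empty
  time_dict.map (fun p =>
    if !is_compound_time p.2 && PySem.Set.contains covered (p.1 + 1) then (p.1, "removed") else p)

-- ===== PRECONDITION & SPEC =====
def Spec_remove_overlap_time (time_dict : List (Int × String)) (out : List (Int × String)) : Prop := out = remove_overlap_time_alt time_dict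
instance (time_dict : List (Int × String)) (out : List (Int × String)) : Decidable (Spec_remove_overlap_time time_dict out) := by unfold Spec_remove_overlap_time; infer_instance

-- ===== CLAIM (what is proved, stated in full; the proofs are below) =====
def Claim_equal_remove_overlap_time : Prop := ∀ (time_dict : List (Int × String)), Dom_remove_overlap_time time_dict → Spec_remove_overlap_time time_dict (remove_overlap_time time_dict)

-- ===== LEMMAS AND PROOFS =====

-- membership in A's interval list (accumulator generalised)
lemma mem_interval_fold (td : List (Int × String)) (acc : List (Int × Int)) (t : Int × Int) :
    t ∈ td.foldl (fun acc p =>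
        if is_compound_time p.2 then acc ++ [(p.1, p.1 + PySem.Str.len p.2)] else acc) acc ↔
      t ∈ acc ∨ ∃ p ∈ td, is_compound_time p.2 = true ∧ t = (p.1, p.1 + PySem.Str.len p.2) := by
  induction td generalizing acc with
  | nil => simp
  | cons q td ih =>
    simp only [List.foldl_cons, ih, List.mem_cons]
    split <;> rename_i h
    · simp [List.mem_append, h]
      tauto
    · simp [h]

-- membership in B's covered set (accumulator generalised)
lemma mem_covered_fold (td : List (Int × String)) (s : PySem.Set Int) (x : Int) :
    x ∈ td.foldl (fun s p =>
        if is_compound_time p.2 then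
          PySem.Set.update s (PySem.List.pyRange p.1 (p.1 + PySem.Str.len p.2 + 1) 1)
        else s) s ↔
      x ∈ s ∨ ∃ p ∈ td, is_compound_time p.2 = true ∧ p.1 ≤ x ∧ x < p.1 + PySem.Str.len p.2 + 1 := by
  induction td generalizing s with
  | nil => simp
  | cons q td ih =>
    simp only [List.foldl_cons, ih, List.mem_cons]
    split <;> rename_i h
    · simp [PySem.Set.mem_update, PySem.List.mem_pyRange_one, h]
      tauto
    · simp [h]

-- the covered-set test equals the interval scan
lemma contains_eq_overlap (td : List (Int × String)) (k : Int) :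
    PySem.Set.contains
      (td.foldl (fun s p =>
        if is_compound_time p.2 then
          PySem.Set.update s (PySem.List.pyRange p.1 (p.1 + PySem.Str.len p.2 + 1) 1)
        else s) PySem.Set.empty) (k + 1)
    = is_overlap k
        (td.foldl (fun acc p =>
          if is_compound_time p.2 then acc ++ [(p.1, p.1 + PySem.Str.len p.2)] else acc) []) := by
  rw [Bool.eq_iff_iff]
  unfold is_overlap
  rw [PySem.Set.contains_iff, mem_covered_fold, List.any_eq_true]
  constructor
  · rintro (hc | ⟨p, hp, hcomp, h1, h2⟩)
    · simp [PySem.Set.empty] at hc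
    · refine ⟨(p.1, p.1 + PySem.Str.len p.2), ?_, ?_⟩
      · exact (mem_interval_fold td [] _).2 (Or.inr ⟨p, hp, hcomp, rfl⟩)
      · simp only [Bool.and_eq_true, decide_eq_true_eq]
        exact ⟨h1, by omega⟩
  · rintro ⟨t, ht, hcond⟩
    rw [mem_interval_fold] at ht
    rcases ht with ht | ⟨p, hp, hcomp, rfl⟩
    · simp at ht
    · simp only [Bool.and_eq_true, decide_eq_true_eq] at hcond
      exact Or.inr ⟨p, hp, hcomp, hcond.1, by omega⟩

-- ===== VERDICT (by name: the statement is the Claim_ definition above) =====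
theorem remove_overlap_time_spec : Claim_equal_remove_overlap_time := by
  intro td _
  unfold Spec_remove_overlap_time remove_overlap_time remove_overlap_time_alt
  apply List.map_congr_left
  intro p _
  rw [contains_eq_overlap td p.1]
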